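-- pv_equiv track=rewrite | github.com/ducknessman/dust | app/admin/util.py | collection_result
-- ===== SOURCE A (Python) =====
-- def collection_result(statuses):
--     success,fail,error = 0,0,0
--     for status in statuses:
--         if status == "success":
--             success += 1
--         elif status == "fail":
--             fail += 1
--         elif status == 'error':
--             error += 1
--     return success,fail,error
-- ===== SOURCE B (Python) =====
-- def collection_result(statuses):
--     statuses = list(statuses)
--     return (statuses.count("success"),
--             statuses.count("fail"),
--             statuses.count("error"))
-- ===== Notes on version B (the rewrite author's own statement) =====
-- stated objective: simpler
-- what changed: Replaces the single accumulator loop with an if/elif branch chain by three independent list.count passes, one per status key, with no conditional logic at all.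
import Mathlib
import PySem

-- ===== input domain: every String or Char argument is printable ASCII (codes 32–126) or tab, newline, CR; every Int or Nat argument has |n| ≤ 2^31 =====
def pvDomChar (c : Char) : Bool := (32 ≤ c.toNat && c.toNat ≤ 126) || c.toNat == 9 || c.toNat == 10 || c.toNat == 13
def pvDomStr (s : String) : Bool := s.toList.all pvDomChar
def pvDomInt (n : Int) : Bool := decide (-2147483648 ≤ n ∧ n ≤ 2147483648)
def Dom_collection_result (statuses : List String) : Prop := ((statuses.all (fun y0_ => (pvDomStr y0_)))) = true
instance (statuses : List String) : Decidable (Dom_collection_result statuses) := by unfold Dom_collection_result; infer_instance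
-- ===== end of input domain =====

-- B counts each of the three keys in its own list.count pass instead of A's single if/elif accumulator loop (simpler).


-- ===== PORT A =====
-- for status in statuses: if/elif chain over the accumulator triple (success, fail, error)
def collectionStep (acc : Int × Int × Int) (status : String) : Int × Int × Int :=
  let (success, fail, error) := acc
  if status == "success" then (success + 1, fail, error)
  else if status == "fail" then (success, fail + 1, error)
  else if status == "error" then (success, fail, error + 1)
  else (success, fail, error)

def collection_result (statuses : List String) : Int × Int × Int :=
  statuses.foldl collectionStep (0, 0, 0)

-- ===== PORT B =====
-- three independent statuses.count passes, one per key
def collection_result_alt (statuses : List String) : Int × Int × Int :=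
  (PySem.List.count statuses "success",
   PySem.List.count statuses "fail",
   PySem.List.count statuses "error")

-- ===== PRECONDITION & SPEC =====
def Spec_collection_result (statuses : List String) (out : Int × Int × Int) : Prop := out = collection_result_alt statuses
instance (statuses : List String) (out : Int × Int × Int) : Decidable (Spec_collection_result statuses out) := by unfold Spec_collection_result; infer_instance

-- ===== CLAIM (what is proved, stated in full; the proofs are below) =====
def Claim_equal_collection_result : Prop := ∀ (statuses : List String), Dom_collection_result statuses → Spec_collection_result statuses (collection_result statuses)

-- ===== LEMMAS AND PROOFS =====

-- ===== VERDICT (by name: the statement is the Claim_ definition above) =====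
-- A's fold, from an arbitrary starting triple, adds the three counts componentwise.
theorem collection_result_foldl (statuses : List String) (s f e : Int) :
    statuses.foldl collectionStep (s, f, e)
    = (s + statuses.count "success", f + statuses.count "fail", e + statuses.count "error") := by
  induction statuses generalizing s f e with
  | nil => simp
  | cons x xs ih =>
    simp only [List.foldl_cons, List.count_cons]
    by_cases hx : x = "success"
    · simp [collectionStep, hx, ih]; omega
    · by_cases hf : x = "fail"
      · simp [collectionStep, hf, ih]; omega
      · by_cases he : x = "error"
        · simp [collectionStep, he, ih]; omega
        · simp [collectionStep, hx, hf, he, ih]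

-- ===== VERDICT (by name: the statement is the Claim_ definition above) =====
theorem collection_result_spec : Claim_equal_collection_result := by
  intro statuses _
  unfold Spec_collection_result collection_result collection_result_alt
  rw [collection_result_foldl]
  simp [PySem.List.count_eq]
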